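-- pv_equiv track=rewrite | github.com/MatALass/shape-tetris | fonction_relative_a_la_forme.py | retirer_la_colonne
-- ===== SOURCE A (Python) =====
-- def retirer_la_colonne(grid, scores):
--      # Nous n'avons malheureusement pas eu le temps d'ajouter cette fonction dans le programme car elle fonctionne
--      # pas complètement. Mais nous pensons qu'elle devrait réussir à fonctionner en la modifiant un petit peu. Elle
--      # permettait de retirer une colonne
--     colonne = []
--     for i in range(len(grid[0])):
--         for j in range(len(grid)):
--             colonne.append(grid[j][i])
--         grid = supprimer_colonne(grid, colonne, scores, i)
--         colonne = []
--     return grid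
--
-- def supprimer_colonne(grid, colonne, score, i):
--     # Idem que la fonction ci dessus cette fonction est appelée dans cette dernière.
--     if 1 not in colonne:
--         for k in range(0, len(grid)):
--             if grid[k][i] == 2:
--                 grid[k][i] = 1
--                 score += 1
--     return grid
-- ===== SOURCE B (Python) =====
-- def retirer_la_colonne(grid, scores):
--     # Simpler decomposition: one row-major pass collects the columns containing a 1,
--     # then a second pass rewrites 2 -> 1 in every other column. Mutates grid in place
--     # and returns the same object, like the original.
--     width = len(grid[0])
--     cols_with_one = {i for row in grid for i in range(width) if row[i] == 1}
--     for row in grid: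
--         for i in range(width):
--             if i not in cols_with_one and row[i] == 2:
--                 row[i] = 1
--     return grid
-- ===== Notes on version B (the rewrite author's own statement) =====
-- stated objective: simpler
-- what changed: A walks column by column, materialising each column into a list and calling a helper that rescans the grid per column; B makes one row-major pass that indexes the set of columns containing a 1, then one rewrite pass that turns 2 into 1 in every other column (dead score bookkeeping dropped).
import Mathlib
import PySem

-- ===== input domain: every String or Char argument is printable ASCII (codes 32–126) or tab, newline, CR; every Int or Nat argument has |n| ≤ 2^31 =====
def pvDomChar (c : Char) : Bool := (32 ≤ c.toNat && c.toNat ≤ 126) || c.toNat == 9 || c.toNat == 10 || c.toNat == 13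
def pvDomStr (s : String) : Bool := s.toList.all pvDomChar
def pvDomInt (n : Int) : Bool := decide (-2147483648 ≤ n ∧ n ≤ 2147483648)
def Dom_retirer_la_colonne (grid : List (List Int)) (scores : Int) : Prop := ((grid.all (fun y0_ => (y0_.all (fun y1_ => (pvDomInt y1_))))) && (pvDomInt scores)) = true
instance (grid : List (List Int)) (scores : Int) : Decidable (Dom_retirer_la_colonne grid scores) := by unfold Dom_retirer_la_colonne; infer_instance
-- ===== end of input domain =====

-- B replaces A's column-by-column build-column-then-rewrite structure with one row-major
-- pass indexing the columns that contain a 1 followed by one rewrite pass (objective: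
-- simpler). Both Pythons mutate `grid` in place and return the same object; the proved
-- equivalence is about the return value.

-- ===== PORT A =====
-- helper: supprimer_colonne(grid, colonne, score, i) (score bookkeeping is dead and dropped from the result)
def supprimer_colonne (grid : List (List Int)) (colonne : List Int) (score : Int) (i : Nat) : List (List Int) :=
  if 1 ∈ colonne then grid
  else
    (List.range grid.length).foldl
      (fun g k =>
        if (g.getD k []).getD i 0 = 2 then g.set k ((g.getD k []).set i 1) else g)
      grid

def retirer_la_colonne (grid : List (List Int)) (scores : Int) : List (List Int) :=
  (List.range (grid.headD []).length).foldl
    (fun g i =>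
      let colonne := (List.range g.length).foldl (fun c j => c ++ [(g.getD j []).getD i 0]) []
      supprimer_colonne g colonne scores i)
    grid

-- ===== PORT B =====
def retirer_la_colonne_alt (grid : List (List Int)) (scores : Int) : List (List Int) :=
  let width := (grid.headD []).length
  let colsWithOne : PySem.Set Nat :=
    grid.foldl
      (fun s row =>
        (List.range width).foldl (fun s i => if row.getD i 0 = 1 then PySem.Set.add s i else s) s)
      PySem.Set.empty
  grid.map (fun row =>
    (List.range width).foldl
      (fun r i => if ¬ i ∈ colsWithOne ∧ r.getD i 0 = 2 then r.set i 1 else r)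
      row)

-- ===== PRECONDITION & SPEC =====
-- Pre_ excludes exactly the inputs where Python A raises IndexError: the empty grid
-- (grid[0]) and ragged grids with a row shorter than row 0 (grid[j][i]).
def Pre_retirer_la_colonne (grid : List (List Int)) (scores : Int) : Prop :=
  grid ≠ [] ∧ ∀ row ∈ grid, (grid.headD []).length ≤ row.length
instance (grid : List (List Int)) (scores : Int) : Decidable (Pre_retirer_la_colonne grid scores) := by
  unfold Pre_retirer_la_colonne; infer_instance

def pvWitness_retirer_la_colonne : List (List Int) × Int := ([[2, 0, 1], [0, 2, 2]], 0)

def Spec_retirer_la_colonne (grid : List (List Int)) (scores : Int) (out : List (List Int)) : Prop := out = retirer_la_colonne_alt grid scores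
instance (grid : List (List Int)) (scores : Int) (out : List (List Int)) : Decidable (Spec_retirer_la_colonne grid scores out) := by unfold Spec_retirer_la_colonne; infer_instance

-- ===== CLAIM (what is proved, stated in full; the proofs are below) =====
def Claim_equal_retirer_la_colonne : Prop := ∀ (grid : List (List Int)) (scores : Int), Dom_retirer_la_colonne grid scores → Pre_retirer_la_colonne grid scores → Spec_retirer_la_colonne grid scores (retirer_la_colonne grid scores)

-- ===== LEMMAS AND PROOFS =====

-- Canonical per-row transform: process columns 0..n-1; at column j, if no row of the
-- original grid has a 1 at column j, rewrite a 2 at j to 1.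
def rowStep (grid : List (List Int)) (j : Nat) (row : List Int) : List Int :=
  if ∃ r ∈ grid, r.getD j 0 = 1 then row
  else if row.getD j 0 = 2 then row.set j 1 else row

def applyCols (grid : List (List Int)) (n : Nat) (row : List Int) : List Int :=
  (List.range n).foldl (fun r j => rowStep grid j r) row

theorem getD_rowStep_ne (grid : List (List Int)) (i j : Nat) (row : List Int) (h : i ≠ j) :
    (rowStep grid i row).getD j 0 = row.getD j 0 := by
  unfold rowStep
  split_ifs <;> simp [List.getD, List.getElem?_set_ne h]

theorem getD_applyCols (grid : List (List Int)) (n j : Nat) (row : List Int) (h : n ≤ j) :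
    (applyCols grid n row).getD j 0 = row.getD j 0 := by
  induction n with
  | zero => simp [applyCols]
  | succ m ih =>
      unfold applyCols
      rw [List.range_succ, List.foldl_append]
      show (rowStep grid m (applyCols grid m row)).getD j 0 = row.getD j 0
      rw [getD_rowStep_ne grid m j _ (by omega), ih (by omega)]

-- A's inner removal loop, run from any state g, rewrites every row independently.
theorem fold_set_rows (i : Nat) (done todo : List (List Int)) :
    (List.range' done.length todo.length).foldl
        (fun g k => if (g.getD k []).getD i 0 = 2 then g.set k ((g.getD k []).set i 1) else g)
        (done ++ todo)
      = done ++ todo.map (fun row => if row.getD i 0 = 2 then row.set i 1 else row) := by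
  induction todo generalizing done with
  | nil => simp
  | cons t rest ih =>
      simp only [List.length_cons, List.map_cons]
      rw [List.range'_succ, List.foldl_cons]
      have hget : ((done ++ t :: rest).getD done.length []) = t := by simp [List.getD]
      have hset : ∀ v, (done ++ t :: rest).set done.length v = done ++ v :: rest := by
        intro v; simp
      by_cases h2 : t.getD i 0 = 2
      · have h2' : t[i]?.getD 0 = 2 := by simpa [List.getD] using h2
        rw [if_pos (by rw [hget]; exact h2), hget, hset]
        have := ih (done ++ [t.set i 1])
        simpa [h2'] using this
      · have h2' : ¬ t[i]?.getD 0 = 2 := by simpa [List.getD] using h2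
        rw [if_neg (by rw [hget]; exact h2)]
        have := ih (done ++ [t])
        simpa [h2'] using this

-- One iteration of A's outer loop, started from the canonical state, advances it one column.
theorem outer_step (grid : List (List Int)) (scores : Int) (i : Nat) :
    supprimer_colonne (grid.map (applyCols grid i))
        ((List.range (grid.map (applyCols grid i)).length).foldl
          (fun c j => c ++ [((grid.map (applyCols grid i)).getD j []).getD i 0]) [])
        scores i
      = grid.map (applyCols grid (i + 1)) := by
  set g := grid.map (applyCols grid i) with hg
  have hcol : ∀ j, j < grid.length →
      (g.getD j []).getD i 0 = (grid.getD j []).getD i 0 := by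
    intro j hj
    have : g.getD j [] = applyCols grid i (grid.getD j []) := by
      simp [hg, List.getD, List.getElem?_map, (List.getElem?_eq_getElem hj)]
    rw [this, getD_applyCols grid i i _ (le_refl i)]
  have hcolonne :
      (List.range g.length).foldl (fun c j => c ++ [(g.getD j []).getD i 0]) []
        = (List.range g.length).map (fun j => (g.getD j []).getD i 0) := by
    simpa using PySem.List.foldl_append_singleton_eq_map (fun j => (g.getD j []).getD i 0) (List.range g.length) []
  have hlen : g.length = grid.length := by simp [hg]
  have hmem : (1 ∈ (List.range g.length).map (fun j => (g.getD j []).getD i 0))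
      ↔ ∃ r ∈ grid, r.getD i 0 = 1 := by
    simp only [List.mem_map, List.mem_range, hlen]
    constructor
    · rintro ⟨j, hj, hv⟩
      refine ⟨grid.getD j [], ?_, ?_⟩
      · have hgj : grid.getD j [] = grid[j] := by
          simp [List.getD, List.getElem?_eq_getElem hj]
        rw [hgj]; exact List.getElem_mem hj
      · rw [← hcol j hj]; exact hv
    · rintro ⟨r, hr, hv⟩
      obtain ⟨j, hj, hrj⟩ := List.mem_iff_getElem.mp hr
      refine ⟨j, hj, ?_⟩
      rw [hcol j hj]
      simp only [List.getD, List.getElem?_eq_getElem hj, hrj, Option.getD_some]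
      simpa [List.getD] using hv
  have happly : ∀ row,
      applyCols grid (i + 1) row = rowStep grid i (applyCols grid i row) := by
    intro row
    unfold applyCols
    rw [List.range_succ, List.foldl_append]
    rfl
  unfold supprimer_colonne
  rw [hcolonne]
  by_cases h1 : ∃ r ∈ grid, r.getD i 0 = 1
  · rw [if_pos (hmem.mpr h1)]
    simp only [hg]
    refine List.map_congr_left ?_ |>.symm
    intro row _
    rw [happly, rowStep, if_pos h1]
  · rw [if_neg (fun h => h1 (hmem.mp h))]
    have := fold_set_rows i [] g
    simp only [List.nil_append, List.length_nil] at this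
    rw [List.range_eq_range', this, hg, List.map_map]
    refine List.map_congr_left ?_ |>.symm
    intro row _
    simp only [Function.comp_apply]
    rw [happly, rowStep, if_neg h1]

-- A computes the canonical transform over all width columns.
theorem retirer_eq_canonical (grid : List (List Int)) (scores : Int) :
    retirer_la_colonne grid scores
      = grid.map (applyCols grid (grid.headD []).length) := by
  unfold retirer_la_colonne
  generalize (grid.headD []).length = w
  induction w with
  | zero =>
      simp only [List.range_zero, List.foldl_nil]
      symm
      rw [List.map_congr_left (fun r _ => (rfl : applyCols grid 0 r = r))]
      exact List.map_id _
  | succ n ih =>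
      rw [List.range_succ, List.foldl_append, ih, List.foldl_cons, List.foldl_nil]
      exact outer_step grid scores n

-- Membership characterisation of B's index set.
theorem mem_inner_fold (w : Nat) (row : List Int) (s : PySem.Set Nat) (j : Nat) :
    j ∈ (List.range w).foldl (fun s i => if row.getD i 0 = 1 then PySem.Set.add s i else s) s
      ↔ j ∈ s ∨ (j < w ∧ row.getD j 0 = 1) := by
  induction w generalizing s with
  | zero => simp
  | succ n ih =>
      rw [List.range_succ, List.foldl_append, List.foldl_cons, List.foldl_nil]
      by_cases h : row.getD n 0 = 1
      · rw [if_pos h, PySem.Set.mem_add, ih]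
        constructor
        · rintro (h' | rfl)
          · rcases h' with h' | ⟨hj, hv⟩
            · exact Or.inl h'
            · exact Or.inr ⟨by omega, hv⟩
          · exact Or.inr ⟨by omega, h⟩
        · rintro (h' | ⟨hj, hv⟩)
          · exact Or.inl (Or.inl h')
          · by_cases hje : j = n
            · exact Or.inr hje
            · exact Or.inl (Or.inr ⟨by omega, hv⟩)
      · rw [if_neg h, ih]
        constructor
        · rintro (h' | ⟨hj, hv⟩)
          · exact Or.inl h'
          · exact Or.inr ⟨by omega, hv⟩
        · rintro (h' | ⟨hj, hv⟩)
          · exact Or.inl h'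
          · have hje : j ≠ n := by rintro rfl; exact h hv
            exact Or.inr ⟨by omega, hv⟩

theorem mem_colsWithOne (grid : List (List Int)) (w : Nat) (s : PySem.Set Nat) (j : Nat) :
    j ∈ grid.foldl
          (fun s row =>
            (List.range w).foldl (fun s i => if row.getD i 0 = 1 then PySem.Set.add s i else s) s)
          s
      ↔ j ∈ s ∨ (j < w ∧ ∃ r ∈ grid, r.getD j 0 = 1) := by
  induction grid generalizing s with
  | nil => simp
  | cons row rest ih =>
      rw [List.foldl_cons, ih, mem_inner_fold]
      constructor
      · rintro ((h | ⟨hj, hv⟩) | ⟨hj, r, hr, hv⟩)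
        · exact Or.inl h
        · exact Or.inr ⟨hj, row, by simp, hv⟩
        · exact Or.inr ⟨hj, r, by simp [hr], hv⟩
      · rintro (h | ⟨hj, r, hr, hv⟩)
        · exact Or.inl (Or.inl h)
        · rcases List.mem_cons.mp hr with rfl | hr'
          · exact Or.inl (Or.inr ⟨hj, hv⟩)
          · exact Or.inr ⟨hj, r, hr', hv⟩

-- B computes the same canonical transform.
theorem alt_eq_canonical (grid : List (List Int)) (scores : Int) :
    retirer_la_colonne_alt grid scores
      = grid.map (applyCols grid (grid.headD []).length) := by
  show grid.map (fun row =>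
      (List.range (grid.headD []).length).foldl
        (fun r i =>
          if ¬ i ∈ grid.foldl
                (fun s row =>
                  (List.range (grid.headD []).length).foldl
                    (fun s i => if row.getD i 0 = 1 then PySem.Set.add s i else s) s)
                PySem.Set.empty
              ∧ r.getD i 0 = 2
          then r.set i 1 else r)
        row)
    = grid.map (applyCols grid (grid.headD []).length)
  set w := (grid.headD []).length with hw
  refine List.map_congr_left ?_
  intro row _
  unfold applyCols
  apply PySem.List.foldl_congr_mem
  intro r i hi
  have hiw : i < w := List.mem_range.mp hi
  have hmem : (i ∈ grid.foldl
      (fun s row =>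
        (List.range w).foldl (fun s i => if row.getD i 0 = 1 then PySem.Set.add s i else s) s)
      PySem.Set.empty) ↔ ∃ r ∈ grid, r.getD i 0 = 1 := by
    rw [mem_colsWithOne]
    simp [PySem.Set.empty, hiw]
  unfold rowStep
  by_cases h1 : ∃ r' ∈ grid, r'.getD i 0 = 1
  · rw [if_pos h1, if_neg (fun hc => hc.1 (hmem.mpr h1))]
  · rw [if_neg h1]
    by_cases h2 : r.getD i 0 = 2
    · rw [if_pos h2, if_pos ⟨fun hm => h1 (hmem.mp hm), h2⟩]
    · rw [if_neg h2, if_neg (by rintro ⟨-, hc⟩; exact h2 hc)]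

-- ===== VERDICT (by name: the statement is the Claim_ definition above) =====
theorem retirer_la_colonne_spec : Claim_equal_retirer_la_colonne := by
  intro grid scores _ _
  unfold Spec_retirer_la_colonne
  rw [retirer_eq_canonical grid scores, alt_eq_canonical grid scores]
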